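-- pv_equiv track=rewrite | github.com/Auyeol/Algorithm | 프로그래머스/0/120890. 가까운 수/가까운 수.py | solution
-- ===== SOURCE A (Python) =====
-- def solution(array, n):
--     arr = []
--     result = []
--
--     for a in array:
--         arr.append(abs(n-a))
--
--     idx = 0
--     min_v = min(arr)
--
--     for i in range(len(arr)):
--         if arr[i] == min_v:
--             result.append(array[i])
--
--     return min(result)
-- ===== SOURCE B (Python) =====
-- def solution(array, n):
--     return min(array, key=lambda a: (abs(n - a), a))
-- ===== Notes on version B (the rewrite author's own statement) =====
-- stated objective: simpler
-- what changed: A single min() over the array with the composite key (abs(n-a), a) replaces A's three passes (build a distance list, find its minimum, collect the tying elements, take their min).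
import Mathlib
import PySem

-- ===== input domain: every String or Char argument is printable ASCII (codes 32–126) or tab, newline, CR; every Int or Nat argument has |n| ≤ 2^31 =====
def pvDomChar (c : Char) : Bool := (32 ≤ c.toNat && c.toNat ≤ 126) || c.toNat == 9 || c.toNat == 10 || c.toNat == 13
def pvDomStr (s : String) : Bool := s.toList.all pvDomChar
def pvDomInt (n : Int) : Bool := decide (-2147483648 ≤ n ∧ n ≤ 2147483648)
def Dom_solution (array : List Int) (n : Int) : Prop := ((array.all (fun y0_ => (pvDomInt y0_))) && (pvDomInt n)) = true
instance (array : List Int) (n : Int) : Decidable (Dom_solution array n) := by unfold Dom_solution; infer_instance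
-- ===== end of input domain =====

-- B replaces A's three passes with one min() using the composite key (abs(n-a), a); objective: simpler.

-- ===== PORT A =====
-- Literal port of A: build the distance list, take its minimum, collect the
-- elements of `array` whose distance equals it, return their minimum.
def solution (array : List Int) (n : Int) : Int :=
  let arr : List Int := array.foldl (fun acc a => acc ++ [|n - a|]) []
  let min_v : Int := (PySem.List.min? arr (fun x => x)).getD 0
  let result : List Int :=
    (PySem.List.pyRange 0 (PySem.List.len arr) 1).foldl
      (fun acc i =>
        if PySem.List.pyGetD arr i 0 = min_v then acc ++ [PySem.List.pyGetD array i 0]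
        else acc) []
  (PySem.List.min? result (fun x => x)).getD 0

-- ===== PORT B =====
-- min(array, key=lambda a: (abs(n - a), a))
def solution_alt (array : List Int) (n : Int) : Int :=
  (PySem.List.min2? array (fun a => |n - a|) (fun a => a)).getD 0

-- ===== PRECONDITION & SPEC =====
-- Python A raises ValueError (min of an empty sequence) on the empty list; so does B.
def Pre_solution (array : List Int) (n : Int) : Prop := array ≠ []
instance (array : List Int) (n : Int) : Decidable (Pre_solution array n) := by unfold Pre_solution; infer_instance
def pvWitness_solution : List Int × Int := ([3, 10, 28], 20)
def Spec_solution (array : List Int) (n : Int) (out : Int) : Prop := out = solution_alt array n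
instance (array : List Int) (n : Int) (out : Int) : Decidable (Spec_solution array n out) := by unfold Spec_solution; infer_instance

-- ===== CLAIM (what is proved, stated in full; the proofs are below) =====
def Claim_equal_solution : Prop := ∀ (array : List Int) (n : Int), Dom_solution array n → Pre_solution array n → Spec_solution array n (solution array n)

-- ===== LEMMAS AND PROOFS =====

-- Lexicographic "not worse" relation used by both characterisations.
def pvLe (n m y : Int) : Prop := |n - m| < |n - y| ∨ (|n - m| = |n - y| ∧ m ≤ y)

lemma pvLe_refl (n m : Int) : pvLe n m m := Or.inr ⟨rfl, le_refl m⟩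

lemma pvLe_trans {n a b c : Int} (h1 : pvLe n a b) (h2 : pvLe n b c) : pvLe n a c := by
  unfold pvLe at *; omega

-- The fold step of min2? with A's composite key, named so lemmas can talk about it.
def pvStep (n : Int) (acc : Option Int) (x : Int) : Option Int :=
  match acc with
  | none => some x
  | some m =>
    if (decide (|n - x| < |n - m|) || !decide (|n - m| < |n - x|) && decide (x < m)) = true
    then some x else some m

lemma min2_eq_foldl_pvStep (n : Int) (xs : List Int) :
    PySem.List.min2? xs (fun a => |n - a|) (fun a => a) = xs.foldl (pvStep n) none := by
  unfold PySem.List.min2?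
  apply PySem.List.foldl_congr_mem
  intro acc x _
  cases acc <;> rfl

-- min2? with these keys returns a lex-minimal element.
lemma min2_foldl_spec (n : Int) :
    ∀ (t : List Int) (m0 : Int), ∃ m : Int,
      t.foldl (pvStep n) (some m0) = some m ∧
      (m = m0 ∨ m ∈ t) ∧ pvLe n m m0 ∧ ∀ y ∈ t, pvLe n m y := by
  intro t
  induction t with
  | nil => intro m0; exact ⟨m0, rfl, Or.inl rfl, pvLe_refl n m0, by simp⟩
  | cons x xs ih =>
    intro m0
    by_cases hc : (decide (|n - x| < |n - m0|) || !decide (|n - m0| < |n - x|) && decide (x < m0)) = true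
    · obtain ⟨m, hm, hmem, hle, hall⟩ := ih x
      refine ⟨m, by simp only [List.foldl_cons, pvStep, hc, if_pos]; exact hm, ?_, ?_, ?_⟩
      · rcases hmem with h | h
        · exact Or.inr (by simp [h])
        · exact Or.inr (List.mem_cons_of_mem _ h)
      · have hx0 : pvLe n x m0 := by
          simp only [Bool.or_eq_true, Bool.and_eq_true, Bool.not_eq_true', decide_eq_true_eq,
            decide_eq_false_iff_not] at hc
          unfold pvLe; omega
        exact pvLe_trans hle hx0
      · intro y hy
        rcases List.mem_cons.mp hy with h | h
        · exact h ▸ hle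
        · exact hall y h
    · obtain ⟨m, hm, hmem, hle, hall⟩ := ih m0
      refine ⟨m, by simp only [List.foldl_cons, pvStep, hc]; exact hm, ?_, hle, ?_⟩
      · rcases hmem with h | h
        · exact Or.inl h
        · exact Or.inr (List.mem_cons_of_mem _ h)
      · intro y hy
        rcases List.mem_cons.mp hy with h | h
        · have hx0 : pvLe n m0 x := by
            simp only [Bool.or_eq_true, Bool.and_eq_true, Bool.not_eq_true', decide_eq_true_eq,
              decide_eq_false_iff_not] at hc
            unfold pvLe; omega
          exact h ▸ pvLe_trans hle hx0
        · exact hall y h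

lemma min2_spec (array : List Int) (n : Int) (h : array ≠ []) :
    ∃ m : Int, PySem.List.min2? array (fun a => |n - a|) (fun a => a) = some m ∧
      m ∈ array ∧ ∀ y ∈ array, pvLe n m y := by
  obtain ⟨x, t, rfl⟩ := List.exists_cons_of_ne_nil h
  obtain ⟨m, hm, hmem, hle, hall⟩ := min2_foldl_spec n t x
  refine ⟨m, ?_, ?_, ?_⟩
  · rw [min2_eq_foldl_pvStep]
    simpa [pvStep] using hm
  · rcases hmem with h | h
    · exact h ▸ List.mem_cons_self
    · exact List.mem_cons_of_mem _ h
  · intro y hy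
    rcases List.mem_cons.mp hy with h | h
    · exact h ▸ hle
    · exact hall y h

-- pyGetD on a left part of an appended list ignores the appended tail.
lemma pyGetD_append_left (xs : List Int) (a : Int) {i : Int} (h0 : 0 ≤ i) (h1 : i < (xs.length : Int)) :
    PySem.List.pyGetD (xs ++ [a]) i 0 = PySem.List.pyGetD xs i 0 := by
  rw [PySem.List.pyGetD_eq_getElem _ _ h0 (by simp; omega),
      PySem.List.pyGetD_eq_getElem _ _ h0 h1]
  exact List.getElem_append_left (by omega)

-- A's index loop collects exactly the elements whose key g equals m, in order.
lemma idx_filter_map (g : Int → Int) (m : Int) :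
    ∀ (array : List Int),
    ((PySem.List.pyRange 0 (PySem.List.len array) 1).filter
        (fun i => decide (PySem.List.pyGetD (array.map g) i 0 = m))).map
        (fun i => PySem.List.pyGetD array i 0)
     = array.filter (fun a => decide (g a = m)) := by
  intro array
  induction array using List.reverseRecOn with
  | nil => simp [PySem.List.pyRange, PySem.List.len]
  | append_singleton xs a ih =>
    have hlen : PySem.List.len (xs ++ [a]) = PySem.List.len xs + 1 := by
      simp [PySem.List.len]
    have hsplit : PySem.List.pyRange 0 (PySem.List.len xs + 1) 1
        = PySem.List.pyRange 0 (PySem.List.len xs) 1 ++ [PySem.List.len xs] := by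
      exact PySem.List.pyRange_one_succ_right (by simp [PySem.List.len])
    rw [hlen, hsplit, List.filter_append, List.map_append]
    have hmemb : ∀ i ∈ PySem.List.pyRange 0 (PySem.List.len xs) 1, 0 ≤ i ∧ i < (xs.length : Int) := by
      intro i hi
      have := PySem.List.mem_pyRange_one.mp hi
      simpa [PySem.List.len] using this
    have hfcongr : (PySem.List.pyRange 0 (PySem.List.len xs) 1).filter
          (fun i => decide (PySem.List.pyGetD ((xs ++ [a]).map g) i 0 = m))
        = (PySem.List.pyRange 0 (PySem.List.len xs) 1).filter
          (fun i => decide (PySem.List.pyGetD (xs.map g) i 0 = m)) := by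
      apply List.filter_congr
      intro i hi
      obtain ⟨h0, h1⟩ := hmemb i hi
      simp only [List.map_append, List.map_cons, List.map_nil]
      rw [pyGetD_append_left (xs.map g) (g a) h0 (by simpa using h1)]
    rw [hfcongr]
    have hmcongr : ((PySem.List.pyRange 0 (PySem.List.len xs) 1).filter
          (fun i => decide (PySem.List.pyGetD (xs.map g) i 0 = m))).map
          (fun i => PySem.List.pyGetD (xs ++ [a]) i 0)
        = ((PySem.List.pyRange 0 (PySem.List.len xs) 1).filter
          (fun i => decide (PySem.List.pyGetD (xs.map g) i 0 = m))).map
          (fun i => PySem.List.pyGetD xs i 0) := by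
      apply List.map_congr_left
      intro i hi
      obtain ⟨h0, h1⟩ := hmemb i (List.mem_of_mem_filter hi)
      exact pyGetD_append_left xs a h0 h1
    rw [hmcongr, ih]
    -- the last index picks up the appended element (pyGetD evaluates by simp)
    by_cases hm : g a = m
    · simp [hm, PySem.List.pyGetD, PySem.List.pyGet?, PySem.List.pyIdx?, PySem.List.len]
    · simp [hm, PySem.List.pyGetD, PySem.List.pyGet?, PySem.List.pyIdx?, PySem.List.len]

-- ===== VERDICT (by name: the statement is the Claim_ definition above) =====
theorem solution_spec : Claim_equal_solution := by
  intro array n _ hpre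
  unfold Pre_solution at hpre
  simp only [Spec_solution, solution, solution_alt]
  have harr : array.foldl (fun acc a => acc ++ [|n - a|]) [] = array.map (fun a => |n - a|) := by
    simpa using PySem.List.foldl_append_singleton_eq_map (fun a => |n - a|) array []
  rw [harr]
  obtain ⟨mb, hmb, hmbmem, hmball⟩ := min2_spec array n hpre
  rw [hmb]
  have hne : array.map (fun a => |n - a|) ≠ [] := by
    simpa using hpre
  rcases hm : PySem.List.min? (array.map (fun a => |n - a|)) (fun x => x) with _ | m
  · exact absurd ((PySem.List.min?_eq_none_iff _ _).mp hm) hne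
  rw [show ((some m).getD 0 : Int) = m from rfl]
  -- the collection loop is a filter-then-map over the indices, hence a filter of array
  have hloop : (PySem.List.pyRange 0 (PySem.List.len (array.map (fun a => |n - a|))) 1).foldl
      (fun acc i =>
        if PySem.List.pyGetD (array.map (fun a => |n - a|)) i 0 = m then
          acc ++ [PySem.List.pyGetD array i 0]
        else acc) []
      = array.filter (fun a => decide (|n - a| = m)) := by
    have hfa := PySem.List.foldl_append_if
        (fun i => decide (PySem.List.pyGetD (array.map (fun a => |n - a|)) i 0 = m))
        (fun i => PySem.List.pyGetD array i 0)
        (PySem.List.pyRange 0 (PySem.List.len (array.map (fun a => |n - a|))) 1) []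
    simp only [decide_eq_true_eq, List.nil_append] at hfa
    rw [hfa]
    have hlm : PySem.List.len (array.map (fun a => |n - a|)) = PySem.List.len array := by
      simp [PySem.List.len]
    rw [hlm]
    exact idx_filter_map (fun a => |n - a|) m array
  rw [hloop]
  -- the filtered list is nonempty: some element attains the minimal distance
  have hmmem : m ∈ array.map (fun a => |n - a|) := PySem.List.min?_mem hm
  obtain ⟨a0, ha0mem, ha0⟩ := List.mem_map.mp hmmem
  have ha0f : a0 ∈ array.filter (fun a => decide (|n - a| = m)) :=
    List.mem_filter.mpr ⟨ha0mem, by simpa using ha0⟩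
  rcases hr : PySem.List.min? (array.filter (fun a => decide (|n - a| = m))) (fun x => x) with _ | r
  · exact absurd ((PySem.List.min?_eq_none_iff _ _).mp hr)
      (List.ne_nil_of_mem ha0f)
  simp only [Option.getD_some]
  -- r and mb coincide: both are the lexicographically minimal element
  have hrf := PySem.List.min?_mem hr
  obtain ⟨hrmem, hrkey⟩ := List.mem_filter.mp hrf
  have hrkey' : |n - r| = m := by simpa using hrkey
  have hrmin := PySem.List.min?_isMin hr
  have hmmin := PySem.List.min?_isMin hm
  have hmble : m ≤ |n - mb| := hmmin _ (List.mem_map.mpr ⟨mb, hmbmem, rfl⟩)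
  have hlexr : pvLe n mb r := hmball r hrmem
  have hmbkey : |n - mb| = m ∧ mb ≤ r := by
    unfold pvLe at hlexr; omega
  have hmbf : mb ∈ array.filter (fun a => decide (|n - a| = m)) :=
    List.mem_filter.mpr ⟨hmbmem, by simpa using hmbkey.1⟩
  have hrle : r ≤ mb := hrmin mb hmbf
  omega
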